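-- pv_equiv track=rewrite | github.com/marcosogsantos/samples | Python/Basic Functions/organize_lists_by_length.py | organizar_listas_por_tamanho
-- ===== SOURCE A (Python) =====
-- def organizar_listas_por_tamanho(listas):
--   n_comparacoes = len(listas)-1
--   index_de_comparacao = 0
--   for lista in listas:
--     while index_de_comparacao < n_comparacoes:
--       elemento = listas[index_de_comparacao]
--       vizinho = listas[index_de_comparacao+1]
--       if len(elemento) < len(vizinho):
--         del listas[index_de_comparacao+1]
--         listas.insert(index_de_comparacao,vizinho)
--       index_de_comparacao+=1
--     index_de_comparacao = 0
--   return listas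
-- ===== SOURCE B (Python) =====
-- def organizar_listas_por_tamanho(listas):
--     buckets = {}
--     maior = 0
--     for lista in listas:
--         tamanho = len(lista)
--         if tamanho in buckets:
--             buckets[tamanho].append(lista)
--         else:
--             buckets[tamanho] = [lista]
--         if tamanho > maior:
--             maior = tamanho
--     resultado = []
--     for tamanho in range(maior, -1, -1):
--         resultado.extend(buckets.get(tamanho, []))
--     listas[:] = resultado
--     return listas
-- ===== Notes on version B (the rewrite author's own statement) =====
-- stated objective: faster
-- what changed: Replaced the in-place repeated bubble passes (n full adjacent-swap sweeps with del/insert) by a single-pass bucket sort: one loop appends each sublist to a dict bucket keyed by its length while tracking the maximum length, then the buckets are concatenated from the largest length down to 0, preserving input order within equal lengths.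
import Mathlib
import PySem

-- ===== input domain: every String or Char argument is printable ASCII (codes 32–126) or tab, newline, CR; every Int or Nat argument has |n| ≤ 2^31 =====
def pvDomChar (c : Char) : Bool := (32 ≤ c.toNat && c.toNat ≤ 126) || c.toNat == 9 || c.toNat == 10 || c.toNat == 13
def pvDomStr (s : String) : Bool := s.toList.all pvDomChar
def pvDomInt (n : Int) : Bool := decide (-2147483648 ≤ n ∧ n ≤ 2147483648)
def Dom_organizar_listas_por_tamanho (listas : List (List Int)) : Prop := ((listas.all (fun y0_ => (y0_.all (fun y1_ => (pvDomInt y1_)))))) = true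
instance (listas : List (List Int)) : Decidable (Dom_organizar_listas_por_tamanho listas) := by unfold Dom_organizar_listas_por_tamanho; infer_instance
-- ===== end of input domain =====

-- B replaces A's repeated in-place bubble passes by a single-pass length-bucket sort (measured faster);
-- in Python both A and B sort the argument list in place and return it, so the side effect matches too:
-- the equivalence proved here is about the returned value.


-- ===== PORT A =====
-- the inner 'while index_de_comparacao < n_comparacoes' loop: compare listas[i] with listas[i+1],
-- on a swap 'del listas[i+1]; listas.insert(i, vizinho)', then 'index_de_comparacao += 1';
-- the pyGet?/pop? none-branches are unreachable (0 ≤ i < n_comparacoes = len listas - 1)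
def pvInnerA (l : List (List Int)) (i : Int) (ncomp : Int) : List (List Int) :=
  if _h : i < ncomp then
    match PySem.List.pyGet? l i, PySem.List.pyGet? l (i + 1) with
    | some elemento, some vizinho =>
      if elemento.length < vizinho.length then
        let l' := match PySem.List.pop? l (i + 1) with
                  | some (_, rest) => PySem.List.insert rest i vizinho
                  | none => l
        pvInnerA l' (i + 1) ncomp
      else pvInnerA l (i + 1) ncomp
    | _, _ => l
  else l
termination_by (ncomp - i).toNat
decreasing_by all_goals omega

-- 'for lista in listas': the body never uses 'lista' and the list keeps its length, so the
-- loop runs exactly (original length) times, re-running the inner loop from index 0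
def pvOuterA (fuel : Nat) (l : List (List Int)) (ncomp : Int) : List (List Int) :=
  match fuel with
  | 0 => l
  | f + 1 => pvOuterA f (pvInnerA l 0 ncomp) ncomp

def organizar_listas_por_tamanho (listas : List (List Int)) : List (List Int) :=
  let n_comparacoes : Int := (listas.length : Int) - 1
  pvOuterA listas.length listas n_comparacoes

-- ===== PORT B =====
-- 'if tamanho in buckets: buckets[tamanho].append(lista) else: buckets[tamanho] = [lista]'
def pvStepBucket (d : PySem.Dict Int (List (List Int))) (lista : List Int) :
    PySem.Dict Int (List (List Int)) :=
  let tamanho : Int := (lista.length : Int)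
  match d.get? tamanho with
  | some v => d.insert tamanho (v ++ [lista])
  | none => d.insert tamanho [lista]

-- 'if tamanho > maior: maior = tamanho'
def pvStepMaior (maior : Int) (lista : List Int) : Int :=
  if (lista.length : Int) > maior then (lista.length : Int) else maior

def organizar_listas_por_tamanho_alt (listas : List (List Int)) : List (List Int) :=
  let st := listas.foldl (fun s e => (pvStepBucket s.1 e, pvStepMaior s.2 e))
      ((PySem.Dict.mk [] : PySem.Dict Int (List (List Int))), (0 : Int))
  (PySem.List.pyRange st.2 (-1) (-1)).foldl (fun acc tamanho => acc ++ st.1.getD tamanho []) []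

-- ===== PRECONDITION & SPEC =====
def Spec_organizar_listas_por_tamanho (listas : List (List Int)) (out : List (List Int)) : Prop := out = organizar_listas_por_tamanho_alt listas
instance (listas : List (List Int)) (out : List (List Int)) : Decidable (Spec_organizar_listas_por_tamanho listas out) := by unfold Spec_organizar_listas_por_tamanho; infer_instance

-- ===== CLAIM (what is proved, stated in full; the proofs are below) =====
def Claim_equal_organizar_listas_por_tamanho : Prop := ∀ (listas : List (List Int)), Dom_organizar_listas_por_tamanho listas → Spec_organizar_listas_por_tamanho listas (organizar_listas_por_tamanho listas)

-- ===== LEMMAS AND PROOFS =====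

-- One bubble pass of A, in carry form: pvGoC c r = (elements already output, current carry);
-- at each step the longer of (carry, next) is output and the shorter is carried on.
def pvGoC (c : List Int) : List (List Int) → List (List Int) × List Int
  | [] => ([], c)
  | y :: r =>
    if c.length < y.length then
      let p := pvGoC c r; (y :: p.1, p.2)
    else
      let p := pvGoC y r; (c :: p.1, p.2)

def pvBubble : List (List Int) → List (List Int)
  | [] => []
  | c :: r => (pvGoC c r).1 ++ [(pvGoC c r).2]

def pvIter : Nat → List (List Int) → List (List Int)
  | 0, l => l
  | k + 1, l => pvIter k (pvBubble l)

def pvDescConcat : Nat → List (List Int) → List (List Int)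
  | 0, z => z.filter (fun x => x.length == 0)
  | m + 1, z => z.filter (fun x => x.length == m + 1) ++ pvDescConcat m z

theorem pvGoC_len (c : List Int) (r : List (List Int)) : (pvGoC c r).1.length = r.length := by
  induction r generalizing c with
  | nil => simp [pvGoC]
  | cons y r ih => simp only [pvGoC]; split_ifs <;> simp [ih]

theorem pvGoC_carry_min (c : List Int) (r : List (List Int)) :
    ∀ x ∈ c :: r, ((pvGoC c r).2).length ≤ x.length := by
  induction r generalizing c with
  | nil => intro x hx; simp [pvGoC] at hx ⊢; simp [hx]
  | cons y r ih =>
    intro x hx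
    simp only [pvGoC]; split_ifs with hlt
    · simp only [List.mem_cons] at hx
      rcases hx with h | h | h
      · rw [h]; exact ih c c (by simp)
      · rw [h]; exact le_trans (ih c c (by simp)) (le_of_lt hlt)
      · exact ih c x (by simp [h])
    · simp only [List.mem_cons] at hx
      rcases hx with h | h | h
      · rw [h]; exact le_trans (ih y y (by simp)) (le_of_not_gt hlt)
      · rw [h]; exact ih y y (by simp)
      · exact ih y x (by simp [h])

theorem pvGoC_out_sub (c : List Int) (r : List (List Int)) :
    ∀ x ∈ (pvGoC c r).1, x ∈ c :: r := by
  induction r generalizing c with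
  | nil => simp [pvGoC]
  | cons y r ih =>
    intro x hx
    simp only [pvGoC] at hx; split_ifs at hx with hlt
    · simp only [List.mem_cons] at hx ⊢
      rcases hx with rfl | hx
      · simp
      · rcases (List.mem_cons.mp (ih c x hx)) with h | h <;> simp [h]
    · simp only [List.mem_cons] at hx ⊢
      rcases hx with rfl | hx
      · simp
      · rcases (List.mem_cons.mp (ih y x hx)) with h | h <;> simp [h]

theorem pvGoC_carry_mem (c : List Int) (r : List (List Int)) : (pvGoC c r).2 ∈ c :: r := by
  induction r generalizing c with
  | nil => simp [pvGoC]
  | cons y r ih =>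
    simp only [pvGoC]; split_ifs with hlt
    · rcases List.mem_cons.mp (ih c) with h | h <;> simp [h]
    · rcases List.mem_cons.mp (ih y) with h | h <;> simp [h]

theorem pvGoC_absorb (c : List Int) (r : List (List Int))
    (hs : r.Pairwise (fun a b => b.length ≤ a.length))
    (hb : ∀ b ∈ r, b.length ≤ c.length) :
    (pvGoC c r).1 ++ [(pvGoC c r).2] = c :: r := by
  induction r generalizing c with
  | nil => simp [pvGoC]
  | cons y r ih =>
    have hny : ¬ c.length < y.length := not_lt.mpr (hb y (by simp))
    simp only [pvGoC, if_neg hny]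
    have := ih y (hs.of_cons) (fun b hbmem => (List.pairwise_cons.mp hs).1 b hbmem)
    simpa using this

theorem pvGoC_append (c : List Int) (u s : List (List Int)) :
    pvGoC c (u ++ s) =
      ((pvGoC c u).1 ++ (pvGoC ((pvGoC c u).2) s).1, (pvGoC ((pvGoC c u).2) s).2) := by
  induction u generalizing c with
  | nil => simp [pvGoC]
  | cons z u ih =>
    simp only [List.cons_append, pvGoC]
    split_ifs with h <;> simp [ih]

theorem pvGoC_filter (c : List Int) (r : List (List Int)) (k : Nat) :
    ((pvGoC c r).1 ++ [(pvGoC c r).2]).filter (fun x => x.length == k) =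
      (c :: r).filter (fun x => x.length == k) := by
  induction r generalizing c with
  | nil => simp [pvGoC]
  | cons y r ih =>
    simp only [pvGoC]; split_ifs with hlt
    · rw [List.cons_append, List.filter_cons, ih c]
      by_cases hy : y.length = k
      · have hc : ¬ c.length = k := by omega
        simp [hy, hc]
      · by_cases hc : c.length = k <;> simp [hy, hc]
    · rw [List.cons_append, List.filter_cons, ih y]
      by_cases hc : c.length = k
      · simp [List.filter_cons, hc]
      · simp [List.filter_cons, hc]

theorem pvBubble_len (l : List (List Int)) : (pvBubble l).length = l.length := by
  cases l with
  | nil => rfl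
  | cons c r => simp [pvBubble, pvGoC_len]

theorem pvBubble_filter (l : List (List Int)) (k : Nat) :
    (pvBubble l).filter (fun x => x.length == k) = l.filter (fun x => x.length == k) := by
  cases l with
  | nil => rfl
  | cons c r => exact pvGoC_filter c r k

theorem pvIter_filter (n : Nat) (l : List (List Int)) (k : Nat) :
    (pvIter n l).filter (fun x => x.length == k) = l.filter (fun x => x.length == k) := by
  induction n generalizing l with
  | zero => rfl
  | succ n ih => rw [pvIter, ih, pvBubble_filter]

theorem pvBubble_step (u s : List (List Int))
    (hs : s.Pairwise (fun a b => b.length ≤ a.length))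
    (hc : ∀ b ∈ s, ∀ a ∈ u, b.length ≤ a.length) :
    ∃ u' s', pvBubble (u ++ s) = u' ++ s' ∧
      s'.Pairwise (fun a b => b.length ≤ a.length) ∧
      (∀ b ∈ s', ∀ a ∈ u', b.length ≤ a.length) ∧
      min (s.length + 1) (u.length + s.length) ≤ s'.length ∧
      u'.length + s'.length = u.length + s.length := by
  cases u with
  | nil =>
    refine ⟨[], s, ?_, hs, by simp, by simp, by simp⟩
    cases s with
    | nil => rfl
    | cons c r =>
      show pvBubble (c :: r) = [] ++ (c :: r)
      rw [List.nil_append]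
      exact pvGoC_absorb c r hs.of_cons (fun b hb => (List.pairwise_cons.mp hs).1 b hb)
  | cons c u' =>
    have hmem : (pvGoC c u').2 ∈ c :: u' := pvGoC_carry_mem c u'
    have habs : (pvGoC (pvGoC c u').2 s).1 ++ [(pvGoC (pvGoC c u').2 s).2] = (pvGoC c u').2 :: s :=
      pvGoC_absorb _ s hs (fun b hb => hc b hb _ hmem)
    refine ⟨(pvGoC c u').1, (pvGoC c u').2 :: s, ?_, ?_, ?_, ?_, ?_⟩
    · show (pvGoC c (u' ++ s)).1 ++ [(pvGoC c (u' ++ s)).2] = _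
      rw [pvGoC_append, List.append_assoc, habs]
    · exact List.pairwise_cons.mpr ⟨fun b hb => hc b hb _ hmem, hs⟩
    · intro b hb a ha
      rcases List.mem_cons.mp hb with h | h
      · rw [h]; exact pvGoC_carry_min c u' a (pvGoC_out_sub c u' a ha)
      · exact hc b h a (pvGoC_out_sub c u' a ha)
    · simp only [List.length_cons]
      exact le_trans (min_le_left _ _) (by omega)
    · have := pvGoC_len c u'
      simp only [List.length_cons]
      omega

theorem pvIter_succ' (k : Nat) (l : List (List Int)) :
    pvIter (k + 1) l = pvBubble (pvIter k l) := by
  induction k generalizing l with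
  | zero => rfl
  | succ k ih => rw [pvIter, ih, pvIter]

theorem pvIter_inv (k : Nat) (l : List (List Int)) :
    ∃ u s, pvIter k l = u ++ s ∧ s.Pairwise (fun a b => b.length ≤ a.length) ∧
      (∀ b ∈ s, ∀ a ∈ u, b.length ≤ a.length) ∧ min k l.length ≤ s.length ∧
      u.length + s.length = l.length := by
  induction k with
  | zero => exact ⟨l, [], by simp [pvIter], by simp, by simp, by simp, by simp⟩
  | succ k ih =>
    obtain ⟨u, s, heq, hs, hc, hmin, hlen⟩ := ih
    obtain ⟨u', s', heq', hs', hc', hmin', hlen'⟩ := pvBubble_step u s hs hc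
    refine ⟨u', s', ?_, hs', hc', ?_, ?_⟩
    · rw [pvIter_succ', heq, heq']
    · omega
    · omega

theorem pvIter_sorted (n : Nat) (l : List (List Int)) (h : l.length ≤ n) :
    (pvIter n l).Pairwise (fun a b => b.length ≤ a.length) := by
  obtain ⟨u, s, heq, hs, _, hmin, hlen⟩ := pvIter_inv n l
  have hu : u = [] := by
    have : u.length = 0 := by omega
    exact List.eq_nil_of_length_eq_zero this
  rw [heq, hu, List.nil_append]
  exact hs

theorem pv_eraseIdx_append (u v : List (List Int)) (n : Nat) :
    (u ++ v).eraseIdx (u.length + n) = u ++ v.eraseIdx n := by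
  induction u with
  | nil => simp
  | cons a u ih => simpa [Nat.succ_add] using ih

theorem pv_inner_eq (N : Nat) (v u : List (List Int)) (hN : v.length ≤ N) :
    pvInnerA (u ++ v) (u.length : Int) ((u.length : Int) + (v.length : Int) - 1) =
      u ++ pvBubble v := by
  induction N generalizing v u with
  | zero =>
    have hv : v = [] := List.eq_nil_of_length_eq_zero (by omega)
    subst hv
    rw [pvInnerA, dif_neg (by simp only [List.length_nil]; push_cast; omega)]
    simp [pvBubble]
  | succ N ih =>
    match v with
    | [] =>
      rw [pvInnerA, dif_neg (by simp only [List.length_nil]; push_cast; omega)]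
      simp [pvBubble]
    | [x] =>
      rw [pvInnerA, dif_neg (by simp only [List.length_nil, List.length_cons]; push_cast; omega)]
      simp [pvBubble, pvGoC]
    | x :: y :: r =>
      have hcond : (u.length : Int) < (u.length : Int) + ((x :: y :: r).length : Int) - 1 := by
        simp only [List.length_cons]; push_cast; omega
      have hg1 : PySem.List.pyGet? (u ++ x :: y :: r) (u.length : Int) = some x := by
        rw [PySem.List.pyGet?_natCast]
        simp
      have hg2 : PySem.List.pyGet? (u ++ x :: y :: r) ((u.length : Int) + 1) = some y := by
        have : (u.length : Int) + 1 = ((u.length + 1 : Nat) : Int) := by push_cast; ring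
        rw [this, PySem.List.pyGet?_natCast]
        simp
      rw [pvInnerA, dif_pos hcond, hg1, hg2]
      dsimp only
      by_cases hlt : x.length < y.length
      · rw [if_pos hlt]
        have hcast : (u.length : Int) + 1 = ((u.length + 1 : Nat) : Int) := by push_cast; ring
        have he : (u ++ x :: y :: r).eraseIdx (u.length + 1) = u ++ x :: r := by
          simpa using pv_eraseIdx_append u (x :: y :: r) 1
        have hgy : (u ++ x :: y :: r)[u.length + 1]? = some y := by
          simp
        have hpop : PySem.List.pop? (u ++ x :: y :: r) ((u.length : Int) + 1) =
            some (y, u ++ x :: r) := by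
          rw [hcast, PySem.List.pop?_natCast _ _ (by simp)]
          rw [he]
          have := List.getElem?_eq_getElem (l := u ++ x :: y :: r) (i := u.length + 1) (by simp)
          rw [this] at hgy
          simp only [Option.some.injEq] at hgy
          rw [hgy]
        rw [hpop]
        dsimp only
        have hins : PySem.List.insert (u ++ x :: r) ((u.length : Int)) y = (u ++ [y]) ++ (x :: r) := by
          rw [PySem.List.insert_natCast _ _ _ (by simp)]
          rw [List.take_left, List.drop_left]
          simp
        rw [hins]
        have harg : (u.length : Int) + 1 = (((u ++ [y]).length : Int)) := by simp
        have hnc : (u.length : Int) + ((x :: y :: r).length : Int) - 1 =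
            (((u ++ [y]).length : Int)) + (((x :: r).length : Int)) - 1 := by simp; ring
        rw [harg, hnc, ih (x :: r) (u ++ [y]) (by simp at hN ⊢; omega)]
        have hb : pvBubble (x :: y :: r) = y :: pvBubble (x :: r) := by
          show (pvGoC x (y :: r)).1 ++ [(pvGoC x (y :: r)).2] = _
          simp only [pvGoC, if_pos hlt]
          rfl
        rw [hb, List.append_assoc]
        rfl
      · rw [if_neg hlt]
        have harg : (u.length : Int) + 1 = ((u ++ [x]).length : Int) := by simp
        have hnc : (u.length : Int) + ((x :: y :: r).length : Int) - 1 =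
            (((u ++ [x]).length : Int)) + (((y :: r).length : Int)) - 1 := by simp; ring
        have hl : u ++ x :: y :: r = (u ++ [x]) ++ (y :: r) := by simp
        rw [harg, hnc, hl, ih (y :: r) (u ++ [x]) (by simp at hN ⊢; omega)]
        show (u ++ [x]) ++ pvBubble (y :: r) = u ++ pvBubble (x :: y :: r)
        have : pvBubble (x :: y :: r) = x :: pvBubble (y :: r) := by
          show (pvGoC x (y :: r)).1 ++ [(pvGoC x (y :: r)).2] = _
          simp only [pvGoC, if_neg hlt]
          rfl
        rw [this, List.append_assoc]
        rfl

theorem pv_inner_eq0 (l : List (List Int)) (n : Nat) (h : l.length = n) :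
    pvInnerA l 0 ((n : Int) - 1) = pvBubble l := by
  have := pv_inner_eq l.length l [] (le_refl _)
  simpa [h] using this

theorem pv_outer_eq (fuel : Nat) (n : Nat) (l : List (List Int)) (h : l.length = n) :
    pvOuterA fuel l ((n : Int) - 1) = pvIter fuel l := by
  induction fuel generalizing l with
  | zero => rfl
  | succ f ih =>
    rw [pvOuterA, pvIter, pv_inner_eq0 l n h]
    exact ih (pvBubble l) (by rw [pvBubble_len, h])

theorem pvA_eq_iter (l : List (List Int)) :
    organizar_listas_por_tamanho l = pvIter l.length l := by
  show pvOuterA l.length l ((l.length : Int) - 1) = _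
  exact pv_outer_eq l.length l.length l rfl

theorem pvDescConcat_nil (m : Nat) : pvDescConcat m [] = [] := by
  induction m with
  | zero => rfl
  | succ m ih => rw [pvDescConcat, ih]; rfl

theorem pvDescConcat_skip (m j : Nat) (z : List (List Int)) (hj : j ≤ m)
    (hb : ∀ x ∈ z, x.length ≤ j) : pvDescConcat m z = pvDescConcat j z := by
  induction m with
  | zero => have : j = 0 := by omega
            rw [this]
  | succ m ih =>
    rcases Nat.eq_or_lt_of_le hj with h | h
    · rw [h]
    · have hf : z.filter (fun x => x.length == m + 1) = [] := by
        apply List.filter_eq_nil_iff.mpr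
        intro x hx
        have := hb x hx
        simp only [beq_iff_eq]
        omega
      rw [pvDescConcat, hf, List.nil_append]
      exact ih (by omega)

theorem pvDescConcat_drop (m : Nat) (x : List Int) (t : List (List Int)) (h : m < x.length) :
    pvDescConcat m (x :: t) = pvDescConcat m t := by
  induction m with
  | zero =>
    have hx : ¬ x.length = 0 := by omega
    simp [pvDescConcat, hx]
  | succ m ih =>
    have hx : ¬ x.length = m + 1 := by omega
    rw [pvDescConcat, pvDescConcat, List.filter_cons]
    simp only [beq_iff_eq]
    rw [if_neg (by simp [hx]), ih (by omega)]

theorem pvDescConcat_sorted (z : List (List Int)) (m : Nat)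
    (hs : z.Pairwise (fun a b => b.length ≤ a.length))
    (hb : ∀ x ∈ z, x.length ≤ m) : pvDescConcat m z = z := by
  induction z generalizing m with
  | nil => exact pvDescConcat_nil m
  | cons x t ih =>
    have hxm : x.length ≤ m := hb x (by simp)
    have hmax : ∀ b ∈ t, b.length ≤ x.length := (List.pairwise_cons.mp hs).1
    rw [pvDescConcat_skip m x.length (x :: t) hxm
      (by intro y hy; rcases List.mem_cons.mp hy with h | h
          · rw [h]
          · exact hmax y h)]
    cases hxl : x.length with
    | zero =>
      rw [pvDescConcat]
      have : ∀ y ∈ x :: t, y.length = 0 := by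
        intro y hy
        rcases List.mem_cons.mp hy with h | h
        · rw [h, hxl]
        · have := hmax y h; omega
      apply List.filter_eq_self.mpr
      intro y hy; simp [this y hy]
    | succ j =>
      have ht : pvDescConcat (j + 1) t = t :=
        ih (j + 1) hs.of_cons (by intro y hy; have := hmax y hy; omega)
      rw [pvDescConcat, List.filter_cons]
      simp only [hxl, beq_iff_eq, if_pos]
      rw [pvDescConcat_drop j x t (by omega), List.cons_append]
      rw [pvDescConcat] at ht
      rw [ht]

theorem pvDescConcat_congr (m : Nat) (z l : List (List Int))
    (h : ∀ k : Nat, z.filter (fun x => x.length == k) = l.filter (fun x => x.length == k)) :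
    pvDescConcat m z = pvDescConcat m l := by
  induction m with
  | zero => exact h 0
  | succ m ih => rw [pvDescConcat, pvDescConcat, h (m + 1), ih]

theorem pv_mem_of_filters (z l : List (List Int))
    (h : ∀ k : Nat, z.filter (fun x => x.length == k) = l.filter (fun x => x.length == k)) :
    ∀ x ∈ z, x ∈ l := by
  intro x hx
  have hxm : x ∈ z.filter (fun y => y.length == x.length) :=
    List.mem_filter.mpr ⟨hx, by simp⟩
  rw [h x.length] at hxm
  exact (List.mem_filter.mp hxm).1

theorem pvStepBucket_eq (d : PySem.Dict Int (List (List Int))) (x : List Int) :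
    pvStepBucket d x = d.insert (x.length : Int) (d.getD (x.length : Int) [] ++ [x]) := by
  cases h : d.get? (x.length : Int) <;> simp [pvStepBucket, PySem.Dict.getD, h]

theorem pvBucket_getD (l : List (List Int)) (d : PySem.Dict Int (List (List Int))) (k : Int) :
    (l.foldl pvStepBucket d).getD k [] =
      d.getD k [] ++ l.filter (fun x => ((x.length : Int) == k)) := by
  induction l generalizing d with
  | nil => simp
  | cons x t ih =>
    rw [List.foldl_cons, ih, pvStepBucket_eq, PySem.Dict.getD_insert]
    by_cases hk : k = (x.length : Int)
    · rw [if_pos hk, List.filter_cons, hk]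
      simp
    · rw [if_neg hk, List.filter_cons]
      have : ¬ ((x.length : Int) == k) = true := by simpa using fun h => hk h.symm
      simp [this]

theorem pvMaior_spec (l : List (List Int)) :
    0 ≤ l.foldl pvStepMaior 0 ∧ ∀ x ∈ l, (x.length : Int) ≤ l.foldl pvStepMaior 0 := by
  have hfun : ∀ (a : Int) (x : List Int), pvStepMaior a x = max a (x.length : Int) := by
    intro a x
    simp only [pvStepMaior]
    split_ifs with h <;> omega
  have hrw : l.foldl pvStepMaior 0 =
      l.foldl (fun acc y => max acc ((y.length : Int))) 0 := by
    apply PySem.List.foldl_congr_mem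
    intro acc x _
    exact hfun acc x
  rw [hrw]
  exact PySem.List.le_foldl_max_int l (fun y => (y.length : Int)) 0

theorem pvRange_desc_zero : PySem.List.pyRange 0 (-1) (-1) = [0] := by decide

theorem pvRange_desc_succ (m : Nat) :
    PySem.List.pyRange ((m : Int) + 1) (-1) (-1) =
      ((m : Int) + 1) :: PySem.List.pyRange (m : Int) (-1) (-1) := by
  simp only [PySem.List.pyRange]
  norm_num
  have h1 : (-1 : Int) < (m : Int) := by omega
  rw [if_pos h1]
  have h2 : ((m : Int) + 1 + 1).toNat = m + 2 := by omega
  rw [h2, List.range_succ_eq_map, List.map_cons, List.map_map]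
  norm_num

theorem pvDict_empty_getD (k : Int) :
    (PySem.Dict.mk [] : PySem.Dict Int (List (List Int))).getD k [] = [] := by
  simp [PySem.Dict.getD, PySem.Dict.get?]

theorem pvFilter_cast (l : List (List Int)) (j : Nat) :
    l.filter (fun x => ((x.length : Int) == (j : Int))) = l.filter (fun x => x.length == j) := by
  apply List.filter_congr
  intro x _
  simp

theorem pvFlatMap_desc (l : List (List Int)) (m : Nat) :
    (PySem.List.pyRange (m : Int) (-1) (-1)).flatMap
        (fun t => (l.foldl pvStepBucket (PySem.Dict.mk [])).getD t []) = pvDescConcat m l := by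
  induction m with
  | zero =>
    rw [Nat.cast_zero, pvRange_desc_zero]
    simp only [List.flatMap_cons, List.flatMap_nil, List.append_nil]
    rw [pvBucket_getD, pvDict_empty_getD, List.nil_append]
    exact pvFilter_cast l 0
  | succ m ih =>
    rw [Nat.cast_succ, pvRange_desc_succ, List.flatMap_cons, ih]
    rw [pvBucket_getD, pvDict_empty_getD, List.nil_append]
    have : ((m : Int) + 1) = ((m + 1 : Nat) : Int) := by push_cast; ring
    rw [this, pvFilter_cast l (m + 1)]
    rfl

theorem pvB_eq_descConcat (l : List (List Int)) :
    organizar_listas_por_tamanho_alt l = pvDescConcat (l.foldl pvStepMaior 0).toNat l := by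
  show (PySem.List.pyRange
      (l.foldl (fun s e => (pvStepBucket s.1 e, pvStepMaior s.2 e))
        ((PySem.Dict.mk [] : PySem.Dict Int (List (List Int))), (0 : Int))).2 (-1) (-1)).foldl
      (fun acc tamanho => acc ++
        (l.foldl (fun s e => (pvStepBucket s.1 e, pvStepMaior s.2 e))
          ((PySem.Dict.mk [] : PySem.Dict Int (List (List Int))), (0 : Int))).1.getD tamanho []) [] = _
  rw [PySem.List.foldl_prod_mk]
  rw [PySem.List.foldl_append_eq_flatMap, List.nil_append]
  have h0 : 0 ≤ l.foldl pvStepMaior 0 := (pvMaior_spec l).1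
  have hM : ((l.foldl pvStepMaior 0).toNat : Int) = l.foldl pvStepMaior 0 := by omega
  rw [← hM]
  exact pvFlatMap_desc l (l.foldl pvStepMaior 0).toNat

theorem pv_main (l : List (List Int)) :
    organizar_listas_por_tamanho l = organizar_listas_por_tamanho_alt l := by
  rw [pvA_eq_iter, pvB_eq_descConcat]
  set z := pvIter l.length l with hz
  set M := (l.foldl pvStepMaior 0).toNat with hMdef
  have hfil : ∀ k : Nat, z.filter (fun x => x.length == k) = l.filter (fun x => x.length == k) :=
    fun k => pvIter_filter l.length l k
  have hsorted := pvIter_sorted l.length l (le_refl _)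
  have hbound : ∀ x ∈ z, x.length ≤ M := by
    intro x hx
    have hxl : x ∈ l := pv_mem_of_filters z l hfil x hx
    have := (pvMaior_spec l).2 x hxl
    omega
  rw [← pvDescConcat_sorted z M hsorted hbound]
  exact pvDescConcat_congr M z l hfil

-- ===== VERDICT (by name: the statement is the Claim_ definition above) =====
theorem organizar_listas_por_tamanho_spec : Claim_equal_organizar_listas_por_tamanho := by
  intro listas _hdom
  unfold Spec_organizar_listas_por_tamanho
  exact pv_main listas
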